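-- pv_equiv track=rewrite | github.com/cms02snu/Algorithm | baekjoon/20058.py | merge_part
-- ===== SOURCE A (Python) =====
-- def merge_part(array):
--     n = len(array)
--     k = len(array[0][0])
--     N = n*k
--     result = [[0]*N for _ in range(N)]
--     for i in range(n):
--         for j in range(n):
--             for x in range(k):
--                 for y in range(k):
--                     result[i*k+x][j*k+y] = array[i][j][x][y]
--
--     return result
-- ===== SOURCE B (Python) =====
-- def merge_part(array):
--     n = len(array)
--     k = len(array[0][0])
--     result = []
--     for i in range(n):
--         for x in range(k):
--             row = []
--             for j in range(n):
--                 row.extend(array[i][j][x][:k])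
--             result.append(row)
--     return result
-- ===== Notes on version B (the rewrite author's own statement) =====
-- stated objective: simpler
-- what changed: B builds the output row by row, concatenating each block's x-th row with extend, instead of preallocating an N x N zero matrix and writing every cell through four nested indexed loops.
import Mathlib
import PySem

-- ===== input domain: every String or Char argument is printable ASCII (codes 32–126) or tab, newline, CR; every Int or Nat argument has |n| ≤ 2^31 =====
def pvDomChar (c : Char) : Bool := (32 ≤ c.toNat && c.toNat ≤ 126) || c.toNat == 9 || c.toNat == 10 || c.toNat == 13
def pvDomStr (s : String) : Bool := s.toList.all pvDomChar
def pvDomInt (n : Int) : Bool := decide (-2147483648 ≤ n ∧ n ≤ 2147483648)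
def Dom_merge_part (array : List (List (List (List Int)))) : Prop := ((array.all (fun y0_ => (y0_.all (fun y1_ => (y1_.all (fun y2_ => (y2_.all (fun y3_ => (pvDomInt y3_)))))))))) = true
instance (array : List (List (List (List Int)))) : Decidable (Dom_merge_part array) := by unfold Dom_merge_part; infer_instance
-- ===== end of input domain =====

-- B builds the merged matrix row by row by concatenating block rows (simpler decomposition);
-- A preallocates an N×N zero matrix and writes every cell through four nested indexed loops.

-- ===== PORT A =====
-- literal port of A: preallocated N×N matrix of zeros, four nested loops writing each cell by index
def merge_part (array : List (List (List (List Int)))) : List (List Int) :=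
  let n := array.length
  let k := ((array.getD 0 []).getD 0 []).length
  let N := n * k
  let result := (List.range N).map (fun _ => List.replicate N (0 : Int))
  (List.range n).foldl (fun result i =>
    (List.range n).foldl (fun result j =>
      (List.range k).foldl (fun result x =>
        (List.range k).foldl (fun result y =>
          result.set (i*k+x) ((result.getD (i*k+x) []).set (j*k+y)
            ((((array.getD i []).getD j []).getD x []).getD y 0))
        ) result) result) result) result

-- ===== PORT B =====
-- literal port of B: for each block row i and in-block row x, build one output row by
-- concatenating the x-th rows (first k cells) of the blocks array[i][j], then append it
def merge_part_alt (array : List (List (List (List Int)))) : List (List Int) :=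
  let n := array.length
  let k := ((array.getD 0 []).getD 0 []).length
  (List.range n).foldl (fun result i =>
    (List.range k).foldl (fun result x =>
      result ++ [(List.range n).foldl (fun row j =>
        row ++ ((((array.getD i []).getD j []).getD x []).take k)) []]) result) []

-- ===== PRECONDITION & SPEC =====
-- Pre_ admits exactly the inputs on which Python A returns (no IndexError): the array and
-- array[0] are nonempty, and (when k > 0) every accessed block row exists and is long enough.
def Pre_merge_part (array : List (List (List (List Int)))) : Prop :=
  array ≠ [] ∧ array.headD [] ≠ [] ∧
  (∀ i < array.length, ∀ j < array.length, ∀ x < ((array.getD 0 []).getD 0 []).length,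
      ((array.getD 0 []).getD 0 []).length ≤ (((array.getD i []).getD j []).getD x []).length) ∧
  (0 < ((array.getD 0 []).getD 0 []).length →
    ∀ i < array.length, array.length ≤ (array.getD i []).length ∧
      ∀ j < array.length,
        ((array.getD 0 []).getD 0 []).length ≤ ((array.getD i []).getD j []).length)
instance (array : List (List (List (List Int)))) : Decidable (Pre_merge_part array) := by
  unfold Pre_merge_part; infer_instance

def pvWitness_merge_part : List (List (List (List Int))) :=
  [[[[1, 2], [3, 4]], [[5, 6], [7, 8]]], [[[9, 1], [2, 3]], [[4, 5], [6, 7]]]]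

def Spec_merge_part (array : List (List (List (List Int)))) (out : List (List Int)) : Prop := out = merge_part_alt array
instance (array : List (List (List (List Int)))) (out : List (List Int)) : Decidable (Spec_merge_part array out) := by unfold Spec_merge_part; infer_instance

-- ===== CLAIM (what is proved, stated in full; the proofs are below) =====
def Claim_equal_merge_part : Prop := ∀ (array : List (List (List (List Int)))), Dom_merge_part array → Pre_merge_part array → Spec_merge_part array (merge_part array)

-- ===== LEMMAS AND PROOFS =====
lemma getD_set {α : Type} (l : List α) (n m : Nat) (a d : α) :
    (l.set n a).getD m d = if m = n ∧ n < l.length then a else l.getD m d := by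
  simp [List.getD, List.getElem?_set]
  split_ifs with h1 h2 h3 h4 h5 <;> try tauto
  · subst h1; rw [List.getElem?_eq_none (by omega)]
lemma set_getD_self {α : Type} (l : List α) (n : Nat) (d : α) :
    l.set n (l.getD n d) = l := by
  by_cases h : n < l.length
  · apply List.ext_getElem
    · simp
    · intro i h1 h2; rw [List.getElem_set]
      split
      · subst_vars; simp [List.getD, List.getElem?_eq_getElem h]
      · rfl
  · rw [List.set_eq_of_length_le (by omega)]
def rowFold (m c0 : Nat) (v : Nat → Int) (row : List Int) : List Int :=
  (List.range m).foldl (fun row y => row.set (c0+y) (v y)) row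
lemma rowFold_length (m c0 : Nat) (v : Nat → Int) (row : List Int) :
    (rowFold m c0 v row).length = row.length := by
  induction m with
  | zero => rfl
  | succ m ih => simp [rowFold, List.range_succ, List.foldl_append] at ih ⊢; simpa using ih
lemma rowFold_getD (m c0 : Nat) (v : Nat → Int) (row : List Int) (c : Nat) :
    (rowFold m c0 v row).getD c 0 =
      if c0 ≤ c ∧ c < c0 + m ∧ c < row.length then v (c - c0) else row.getD c 0 := by
  induction m with
  | zero => simp [rowFold]; intro h1 h2; omega
  | succ m ih =>
    have hL : (rowFold m c0 v row).length = row.length := rowFold_length ..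
    simp only [rowFold, List.range_succ, List.foldl_append, List.foldl_cons, List.foldl_nil]
    rw [getD_set]
    simp only [rowFold] at ih hL
    rw [hL, ih]
    split_ifs <;> first
      | rfl
      | omega
      | (rename_i h _; rw [show c - c0 = m by omega])
lemma collapseY (kk r c0 : Nat) (v : Nat → Int) (res : List (List Int)) :
    (List.range kk).foldl (fun res y => res.set r ((res.getD r []).set (c0+y) (v y))) res
      = res.set r (rowFold kk c0 v (res.getD r [])) := by
  induction kk with
  | zero =>
    simp only [List.range_zero, List.foldl_nil, rowFold]
    exact (set_getD_self res r []).symm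
  | succ m ih =>
    simp only [List.range_succ, List.foldl_append, List.foldl_cons, List.foldl_nil, ih]
    by_cases hr : r < res.length
    · rw [List.set_set]
      rw [getD_set]
      simp only [hr, and_true, if_true]
      congr 1
      simp [rowFold, List.range_succ, List.foldl_append]
    · rw [List.set_eq_of_length_le (l := res) (by omega), List.set_eq_of_length_le (l := res) (by omega),
          List.set_eq_of_length_le (l := res) (by omega)]
def applyAt (res : List (List Int)) (r : Nat) (g : List Int → List Int) : List (List Int) :=
  res.set r (g (res.getD r []))
def pvF (array : List (List (List (List Int)))) (i j x : Nat) : List Int :=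
  ((array.getD i []).getD j []).getD x []
def tripsT (n k : Nat) : List ((Nat × Nat) × Nat) :=
  ((List.range n).flatMap (fun a => (List.range n).map (fun b => (a, b)))).flatMap
    (fun a => (List.range k).map (fun b => (a, b)))
def stepA (array : List (List (List (List Int)))) (k : Nat)
    (res : List (List Int)) (t : (Nat × Nat) × Nat) : List (List Int) :=
  applyAt res (t.1.1*k+t.2) (rowFold k (t.1.2*k) (fun y => (pvF array t.1.1 t.1.2 t.2).getD y 0))

lemma flatten2 {α β γ : Type} (L1 : List α) (L2 : α → List β) (s : γ → α → β → γ) :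
    ∀ init, L1.foldl (fun acc a => (L2 a).foldl (fun acc b => s acc a b) acc) init
      = (L1.flatMap (fun a => (L2 a).map (fun b => (a, b)))).foldl (fun acc p => s acc p.1 p.2) init := by
  induction L1 with
  | nil => intro init; rfl
  | cons a L ih =>
    intro init
    simp only [List.flatMap_cons, List.foldl_append, List.foldl_cons, List.foldl_map, ih]

lemma mem_tripsT (n k : Nat) (t : (Nat × Nat) × Nat) :
    t ∈ tripsT n k ↔ t.1.1 < n ∧ t.1.2 < n ∧ t.2 < k := by
  obtain ⟨⟨i, j⟩, x⟩ := t
  simp [tripsT]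
  tauto

lemma length_applyAt (res : List (List Int)) (r : Nat) (g : List Int → List Int) :
    (applyAt res r g).length = res.length := by simp [applyAt]

lemma rowD_applyAt (res : List (List Int)) (r : Nat) (g : List Int → List Int) (r' : Nat) :
    (applyAt res r g).getD r' [] =
      if r' = r ∧ r < res.length then g (res.getD r []) else res.getD r' [] := by
  rw [applyAt, getD_set]

lemma foldT_length (array : List (List (List (List Int)))) (k : Nat) :
    ∀ (T : List ((Nat × Nat) × Nat)) (res : List (List Int)),
      (T.foldl (stepA array k) res).length = res.length := by
  intro T
  induction T with
  | nil => intro res; rfl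
  | cons t T ih => intro res; rw [List.foldl_cons, ih, stepA, length_applyAt]

lemma foldT_rowlen (array : List (List (List (List Int)))) (k : Nat) :
    ∀ (T : List ((Nat × Nat) × Nat)) (res : List (List Int)) (r' : Nat),
      ((T.foldl (stepA array k) res).getD r' []).length = (res.getD r' []).length := by
  intro T
  induction T with
  | nil => intro res r'; rfl
  | cons t T ih =>
    intro res r'
    rw [List.foldl_cons, ih, stepA, rowD_applyAt]
    split
    · rw [rowFold_length]; simp_all
    · rfl

lemma div_interval (k j c : Nat) (h1 : j*k ≤ c) (h2 : c < j*k + k) : c / k = j :=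
  Nat.div_eq_of_lt_le (by omega) (by rw [Nat.succ_mul]; omega)

lemma idx_div (i x k : Nat) (hx : x < k) : (i*k + x) / k = i := by
  rw [mul_comm i k, Nat.mul_add_div (by omega), Nat.div_eq_of_lt hx]
  omega

lemma idx_mod (i x k : Nat) (hx : x < k) : (i*k + x) % k = x := by
  rw [mul_comm i k, Nat.mul_add_mod, Nat.mod_eq_of_lt hx]
lemma foldT_entry (array : List (List (List (List Int)))) (n k : Nat) (hk : 0 < k) :
    ∀ (T : List ((Nat × Nat) × Nat)) (res : List (List Int)),
      (∀ t ∈ T, t.1.1 < n ∧ t.1.2 < n ∧ t.2 < k) →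
      res.length = n*k → (∀ r < n*k, ((res.getD r []).length = n*k)) →
      ∀ r c, r < n*k → c < n*k →
        (((T.foldl (stepA array k) res).getD r []).getD c 0) =
          if ((r/k, c/k), r%k) ∈ T then (pvF array (r/k) (c/k) (r%k)).getD (c%k) 0
          else ((res.getD r []).getD c 0) := by
  intro T
  induction T with
  | nil => intro res _ _ _ r c hr hc; simp
  | cons t T ih =>
    intro res hb hlen hrow r c hr hc
    obtain ⟨⟨ti, tj⟩, tx⟩ := t
    have hbt : ti < n ∧ tj < n ∧ tx < k := hb _ (List.mem_cons_self ..)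
    have hres' : (stepA array k res ((ti, tj), tx)).length = n*k := by
      rw [stepA, length_applyAt, hlen]
    have hrow' : ∀ r' < n*k, ((stepA array k res ((ti, tj), tx)).getD r' []).length = n*k := by
      intro r' hr'
      rw [stepA, rowD_applyAt]
      split
      · rw [rowFold_length]; rename_i h; rw [← h.1]; exact hrow r' hr'
      · exact hrow r' hr'
    rw [List.foldl_cons, ih _ (fun t ht => hb t (List.mem_cons_of_mem _ ht)) hres' hrow' r c hr hc]
    by_cases hin : ((r/k, c/k), r%k) ∈ T
    · rw [if_pos hin, if_pos (List.mem_cons_of_mem _ hin)]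
    · rw [if_neg hin]
      by_cases hw : ((ti, tj), tx) = ((r/k, c/k), r%k)
      · -- t is the unique writer of (r, c)
        rw [if_pos (by rw [← hw]; exact List.mem_cons_self ..)]
        have hw' : (ti = r/k ∧ tj = c/k) ∧ tx = r%k := by simpa [Prod.ext_iff] using hw
        obtain ⟨⟨h1, h2⟩, h3⟩ := hw'
        subst h1; subst h2; subst h3
        have hrk : (r/k)*k + r%k = r := by rw [mul_comm]; exact Nat.div_add_mod r k
        have hck : (c/k)*k + c%k = c := by rw [mul_comm]; exact Nat.div_add_mod c k
        have hmk : c % k < k := Nat.mod_lt _ hk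
        rw [stepA, rowD_applyAt, if_pos ⟨hrk.symm, by rw [hrk, hlen]; exact hr⟩]
        simp only [pvF]
        rw [rowFold_getD, if_pos ⟨by omega, by omega, by rw [hrk, hrow r hr]; exact hc⟩]
        congr 1
        omega
      · -- t does not write (r, c)
        rw [if_neg (fun h => (List.mem_cons.1 h).elim (fun h => hw h.symm) hin)]
        rw [stepA, rowD_applyAt]
        split_ifs with h
        · rw [rowFold_getD, if_neg]
          · rw [h.1]
          · rintro ⟨hA, hB, -⟩
            have hdiv : c / k = tj := div_interval k tj c hA hB
            have hti : ti = r / k := by rw [h.1]; exact (idx_div ti tx k hbt.2.2).symm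
            have htx : tx = r % k := by rw [h.1]; exact (idx_mod ti tx k hbt.2.2).symm
            exact hw (by rw [hti, htx, hdiv])
        · rfl
lemma len_flatMap_const {α : Type} (n k : Nat) (g : Nat → List α)
    (hg : ∀ i < n, (g i).length = k) :
    ((List.range n).flatMap g).length = n*k := by
  induction n with
  | zero => simp
  | succ n ih =>
    rw [List.range_succ, List.flatMap_append, List.length_append,
        ih (fun i hi => hg i (by omega))]
    simp [hg n (by omega), Nat.succ_mul]
lemma getD_flatMap_const {α : Type} (n k : Nat) (g : Nat → List α) (d : α)
    (hg : ∀ i < n, (g i).length = k) :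
    ∀ r < n*k, ((List.range n).flatMap g).getD r d = (g (r/k)).getD (r%k) d := by
  induction n with
  | zero => intro r hr; omega
  | succ n ih =>
    intro r hr
    have hsm : (n+1)*k = n*k + k := by ring
    have hk : 0 < k := by
      rcases Nat.eq_zero_or_pos k with h | h
      · subst h; simp at hr
      · exact h
    have hlen : ((List.range n).flatMap g).length = n*k :=
      len_flatMap_const n k g (fun i hi => hg i (by omega))
    rw [List.range_succ, List.flatMap_append]
    by_cases h : r < n*k
    · rw [List.getD_append _ _ _ _ (by omega), ih (fun i hi => hg i (by omega)) r h]
    · have h1 : r / k = n := div_interval k n r (by omega) (by omega)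
      have h2 : r % k = r - n*k := by
        have := Nat.div_add_mod r k
        rw [h1, mul_comm] at this; omega
      rw [List.getD_append_right _ _ _ _ (by omega), hlen, h1, h2]
      simp
lemma foldl_self_id {α β : Type} (L : List α) (res : β) :
    L.foldl (fun r _ => r) res = res := by
  induction L generalizing res with
  | nil => rfl
  | cons a L ih => simpa using ih res

lemma A_eq_fold (array : List (List (List (List Int)))) :
    merge_part array =
      (tripsT array.length ((array.getD 0 []).getD 0 []).length).foldl
        (stepA array ((array.getD 0 []).getD 0 []).length)
        ((List.range (array.length * ((array.getD 0 []).getD 0 []).length)).map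
          (fun _ => List.replicate (array.length * ((array.getD 0 []).getD 0 []).length) (0 : Int))) := by
  unfold merge_part
  simp only [collapseY]
  rw [flatten2]
  simp only [flatten2]
  rfl
lemma flatMap_singleton_fun {α β : Type} (l : List α) (f : α → List β) :
    l.flatMap (fun x => [f x]) = l.map f := by
  induction l with
  | nil => rfl
  | cons a l ih => simp only [List.flatMap_cons, List.map_cons, ih, List.singleton_append]

lemma B_eq_flatMap (array : List (List (List (List Int)))) :
    merge_part_alt array =
      (List.range array.length).flatMap (fun i =>
        (List.range ((array.getD 0 []).getD 0 []).length).map (fun x =>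
          (List.range array.length).flatMap (fun j => (pvF array i j x).take
            ((array.getD 0 []).getD 0 []).length))) := by
  unfold merge_part_alt
  simp only [PySem.List.foldl_append_eq_flatMap, List.nil_append, pvF]
  congr 1
  funext i
  exact flatMap_singleton_fun _ _

lemma getD_map_range {α : Type} (k m : Nat) (f : Nat → α) (d : α) (hm : m < k) :
    ((List.range k).map f).getD m d = f m := by
  rw [List.getD_eq_getElem _ _ (by simpa using hm)]
  simp

lemma A_empty (array : List (List (List (List Int))))
    (hk : ((array.getD 0 []).getD 0 []).length = 0) : merge_part array = [] := by
  unfold merge_part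
  simp only [hk, Nat.mul_zero, List.range_zero, List.map_nil, List.foldl_nil, foldl_self_id]

lemma B_empty (array : List (List (List (List Int))))
    (hk : ((array.getD 0 []).getD 0 []).length = 0) : merge_part_alt array = [] := by
  unfold merge_part_alt
  simp only [hk, List.range_zero, List.foldl_nil, foldl_self_id]
lemma getD_take (l : List Int) (k m : Nat) (hm : m < k) (hlen : k ≤ l.length) :
    (l.take k).getD m 0 = l.getD m 0 := by
  rw [List.getD_eq_getElem _ _ (by rw [List.length_take]; omega),
      List.getD_eq_getElem _ _ (by omega)]
  exact List.getElem_take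

lemma main_pos (array : List (List (List (List Int))))
    (hk : 0 < ((array.getD 0 []).getD 0 []).length)
    (h3 : ∀ i < array.length, ∀ j < array.length,
      ∀ x < ((array.getD 0 []).getD 0 []).length,
        ((array.getD 0 []).getD 0 []).length ≤ (pvF array i j x).length) :
    merge_part array = merge_part_alt array := by
  rw [A_eq_fold array, B_eq_flatMap array]
  set n := array.length with hn
  set k := ((array.getD 0 []).getD 0 []).length with hkd
  set M0 := (List.range (n * k)).map (fun _ => List.replicate (n * k) (0 : Int)) with hM0
  set Af := (tripsT n k).foldl (stepA array k) M0 with hAf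
  set Bf := (List.range n).flatMap (fun i =>
    (List.range k).map (fun x =>
      (List.range n).flatMap (fun j => (pvF array i j x).take k))) with hBf
  have hM0len : M0.length = n*k := by rw [hM0]; simp
  have hM0row : ∀ r < n*k, ((M0).getD r []).length = n*k := by
    intro r hr
    rw [hM0, getD_map_range _ _ _ _ hr, List.length_replicate]
  have hAlen : Af.length = n*k := by rw [hAf, foldT_length, hM0len]
  have hArowlen : ∀ r < n*k, ((Af).getD r []).length = n*k := by
    intro r hr
    rw [hAf, foldT_rowlen]
    exact hM0row r hr
  have hAe : ∀ r c, r < n*k → c < n*k →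
      ((Af).getD r []).getD c 0 = (pvF array (r/k) (c/k) (r%k)).getD (c%k) 0 := by
    intro r c hr hc
    rw [hAf, foldT_entry array n k hk (tripsT n k) M0
        (fun t ht => (mem_tripsT n k t).1 ht) hM0len hM0row r c hr hc,
      if_pos ((mem_tripsT n k _).2
        ⟨(Nat.div_lt_iff_lt_mul hk).2 hr, (Nat.div_lt_iff_lt_mul hk).2 hc, Nat.mod_lt _ hk⟩)]
  have hrowB : ∀ i < n, ∀ x < k,
      ((List.range n).flatMap (fun j => (pvF array i j x).take k)).length = n*k := by
    intro i hi x hx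
    apply len_flatMap_const
    intro j hj
    rw [List.length_take]
    exact Nat.min_eq_left (h3 i hi j hj x hx)
  have hBlen : Bf.length = n*k := by
    rw [hBf]
    exact len_flatMap_const n k _ (fun i hi => by simp)
  have hBrow : ∀ r < n*k, (Bf).getD r [] =
      (List.range n).flatMap (fun j => (pvF array (r/k) j (r%k)).take k) := by
    intro r hr
    rw [hBf, getD_flatMap_const n k _ [] (fun i hi => by simp) r hr,
        getD_map_range _ _ _ _ (Nat.mod_lt _ hk)]
  have hBrowlen : ∀ r < n*k, ((Bf).getD r []).length = n*k := by
    intro r hr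
    rw [hBrow r hr]
    exact hrowB _ ((Nat.div_lt_iff_lt_mul hk).2 hr) _ (Nat.mod_lt _ hk)
  have hBe : ∀ r c, r < n*k → c < n*k →
      ((Bf).getD r []).getD c 0 = (pvF array (r/k) (c/k) (r%k)).getD (c%k) 0 := by
    intro r c hr hc
    have hdr : r/k < n := (Nat.div_lt_iff_lt_mul hk).2 hr
    have hmr : r%k < k := Nat.mod_lt _ hk
    rw [hBrow r hr, getD_flatMap_const n k _ 0
        (fun j hj => by rw [List.length_take]; exact Nat.min_eq_left (h3 _ hdr _ hj _ hmr)) c hc]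
    exact getD_take _ k _ (Nat.mod_lt _ hk) (h3 _ hdr _ ((Nat.div_lt_iff_lt_mul hk).2 hc) _ hmr)
  apply List.ext_getElem
  · rw [hAlen, hBlen]
  · intro r h1 h2
    have hr : r < n*k := by rw [← hAlen]; exact h1
    apply List.ext_getElem
    · rw [← List.getD_eq_getElem Af [] h1, ← List.getD_eq_getElem Bf [] h2,
          hArowlen r hr, hBrowlen r hr]
    · intro c hc1 hc2
      have hc : c < n*k := by
        rw [← List.getD_eq_getElem Af [] h1, hArowlen r hr] at hc1
        exact hc1
      have kA : (Af.getD r []).getD c 0 = Af[r][c] := by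
        rw [List.getD_eq_getElem Af [] h1]
        exact List.getD_eq_getElem _ _ hc1
      have kB : (Bf.getD r []).getD c 0 = Bf[r][c] := by
        rw [List.getD_eq_getElem Bf [] h2]
        exact List.getD_eq_getElem _ _ hc2
      rw [← kA, ← kB, hAe r c hr hc, hBe r c hr hc]

-- ===== VERDICT (by name: the statement is the Claim_ definition above) =====
theorem merge_part_spec : Claim_equal_merge_part := by
  intro array _ hpre
  unfold Spec_merge_part
  obtain ⟨hne, hhd, h3, h4⟩ := hpre
  by_cases hk0 : ((array.getD 0 []).getD 0 []).length = 0
  · rw [A_empty array hk0, B_empty array hk0]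
  · exact main_pos array (Nat.pos_of_ne_zero hk0) h3
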